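-- pv_equiv track=rewrite | github.com/NikitaLoik/mRNADisplayResults_Analysis | utility_functions.py | peptides_appearances_by_cycle
-- ===== SOURCE A (Python) =====
-- def peptides_appearances_by_cycle(
--         base_cycle_sorted_peptides_list: list,
--         peptides_occurrences_by_cycle):
--     '''
--     returns for each peptide in selection a list of cycles in which this peptide appears:
--     {peptide_x:    [cycle_1, ..., cycle_n]}
--     '''
--     peptides_appearances_by_cycle = {}
--
--     for peptide in base_cycle_sorted_peptides_list:
--         peptides_appearances_by_cycle[peptide] = []
--         for cycle in peptides_occurrences_by_cycle:
--             if peptide in peptides_occurrences_by_cycle[cycle]: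
--                 peptides_appearances_by_cycle[peptide] += [cycle]
--     return peptides_appearances_by_cycle
-- ===== SOURCE B (Python) =====
-- def peptides_appearances_by_cycle(
--         base_cycle_sorted_peptides_list: list,
--         peptides_occurrences_by_cycle):
--     # Inverted index: one pass over the cycles, then a projection pass.
--     index = {}
--     for cycle, peptides in peptides_occurrences_by_cycle.items():
--         for peptide in dict.fromkeys(peptides):
--             index.setdefault(peptide, []).append(cycle)
--     result = {}
--     for peptide in base_cycle_sorted_peptides_list:
--         result[peptide] = index.get(peptide, [])
--     return result
-- ===== Notes on version B (the rewrite author's own statement) =====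
-- stated objective: faster
-- what changed: Replaces A's per-peptide scan over every cycle's member list with a single inverted-index pass (peptide -> cycles) over the cycle dict followed by a projection pass over the base peptide list.
import Mathlib
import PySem

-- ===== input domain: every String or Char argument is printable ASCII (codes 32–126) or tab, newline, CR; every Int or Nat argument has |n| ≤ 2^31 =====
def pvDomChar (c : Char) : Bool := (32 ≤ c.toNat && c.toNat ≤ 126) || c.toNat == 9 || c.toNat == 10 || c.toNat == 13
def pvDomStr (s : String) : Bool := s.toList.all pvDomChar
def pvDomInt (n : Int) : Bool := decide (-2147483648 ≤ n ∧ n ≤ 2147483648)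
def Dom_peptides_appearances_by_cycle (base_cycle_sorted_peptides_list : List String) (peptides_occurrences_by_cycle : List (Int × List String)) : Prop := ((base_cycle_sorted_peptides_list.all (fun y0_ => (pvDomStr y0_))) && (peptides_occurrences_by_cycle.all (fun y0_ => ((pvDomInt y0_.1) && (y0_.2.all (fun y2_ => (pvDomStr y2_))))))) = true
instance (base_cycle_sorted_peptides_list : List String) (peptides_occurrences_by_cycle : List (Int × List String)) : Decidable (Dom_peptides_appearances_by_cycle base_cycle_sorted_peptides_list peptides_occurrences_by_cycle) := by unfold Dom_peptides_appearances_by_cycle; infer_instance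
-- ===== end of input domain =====

-- B builds an inverted peptide→cycles index in one pass and then projects the base list through it,
-- instead of A's per-peptide scan over every cycle's member list (measured faster, asymptotic change).

-- ===== PORT A =====
-- A: for each peptide, start its entry at [] and scan every cycle key, appending the cycle
-- when the peptide is a member of that cycle's list.
def peptides_appearances_by_cycle (base_cycle_sorted_peptides_list : List String) (peptides_occurrences_by_cycle : List (Int × List String)) : List (String × List Int) :=
  let d : PySem.Dict Int (List String) := PySem.Dict.ofList peptides_occurrences_by_cycle
  (base_cycle_sorted_peptides_list.foldl (fun res peptide =>
      d.keys.foldl (fun res cycle =>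
          -- 'peptides_occurrences_by_cycle[cycle]': cycle comes from d.keys, so the lookup
          -- always succeeds; getD with [] is exact here.
          if peptide ∈ d.getD cycle [] then res.modify peptide [] (· ++ [cycle]) else res)
        (res.insert peptide []))
    PySem.Dict.empty).items

-- ===== PORT B =====
-- B: one pass over the cycles builds index : peptide → cycles (dedup within a cycle, as
-- Source B iterates dict.fromkeys(peptides)), then one projection pass over the base list.
def peptides_appearances_by_cycle_alt (base_cycle_sorted_peptides_list : List String) (peptides_occurrences_by_cycle : List (Int × List String)) : List (String × List Int) :=
  let d : PySem.Dict Int (List String) := PySem.Dict.ofList peptides_occurrences_by_cycle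
  let index : PySem.Dict String (List Int) :=
    d.items.foldl (fun idx cv =>
        (PySem.List.dedup cv.2).foldl (fun idx peptide => idx.modify peptide [] (· ++ [cv.1])) idx)
      PySem.Dict.empty
  (base_cycle_sorted_peptides_list.foldl (fun res peptide =>
      res.insert peptide (index.getD peptide [])) PySem.Dict.empty).items

-- ===== PRECONDITION & SPEC =====
def Spec_peptides_appearances_by_cycle (base_cycle_sorted_peptides_list : List String) (peptides_occurrences_by_cycle : List (Int × List String)) (out : List (String × List Int)) : Prop := out = peptides_appearances_by_cycle_alt base_cycle_sorted_peptides_list peptides_occurrences_by_cycle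
instance (base_cycle_sorted_peptides_list : List String) (peptides_occurrences_by_cycle : List (Int × List String)) (out : List (String × List Int)) : Decidable (Spec_peptides_appearances_by_cycle base_cycle_sorted_peptides_list peptides_occurrences_by_cycle out) := by unfold Spec_peptides_appearances_by_cycle; infer_instance

-- ===== CLAIM (what is proved, stated in full; the proofs are below) =====
def Claim_equal_peptides_appearances_by_cycle : Prop := ∀ (base_cycle_sorted_peptides_list : List String) (peptides_occurrences_by_cycle : List (Int × List String)), Dom_peptides_appearances_by_cycle base_cycle_sorted_peptides_list peptides_occurrences_by_cycle → Spec_peptides_appearances_by_cycle base_cycle_sorted_peptides_list peptides_occurrences_by_cycle (peptides_appearances_by_cycle base_cycle_sorted_peptides_list peptides_occurrences_by_cycle)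

-- ===== LEMMAS AND PROOFS =====

-- modify at a key just inserted = insert of the modified value
theorem pv_modify_insert (r : PySem.Dict String (List Int)) (p : String) (acc : List Int)
    (f : List Int → List Int) :
    (r.insert p acc).modify p [] f = r.insert p (f acc) := by
  have hg : (r.insert p acc).getD p [] = acc := PySem.Dict.getD_insert_self r p acc []
  apply PySem.Dict.ext
  simp only [PySem.Dict.modify, PySem.Dict.contains_insert_self, if_true, hg,
    PySem.Dict.items_insert]
  by_cases h : r.contains p = true
  · simp only [h, if_true, List.map_map]
    apply List.map_congr_left
    intro q _
    by_cases hq : q.1 = p <;> simp [hq]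
  · simp only [h, if_false, List.map_append, Bool.false_eq_true]
    have hmem : ∀ q ∈ r.items, q.1 ≠ p := by
      intro q hq hqp
      have := PySem.Dict.mem_keys_of_mem_items (d := r) hq
      rw [hqp, ← PySem.Dict.contains_iff_mem_keys] at this
      simp [h] at this
    rw [List.map_congr_left (g := id) (by intro q hq; simp [hmem q hq]), List.map_id]
    simp

-- A's inner loop over the cycle keys collects exactly the keys whose member list contains p
theorem pv_innerA (d : PySem.Dict Int (List String)) (p : String) :
    ∀ (ks : List Int) (r : PySem.Dict String (List Int)) (acc : List Int),
    ks.foldl (fun r c => if p ∈ d.getD c [] then r.modify p [] (· ++ [c]) else r) (r.insert p acc)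
      = r.insert p (acc ++ ks.filter (fun c => decide (p ∈ d.getD c []))) := by
  intro ks
  induction ks with
  | nil => intro r acc; simp
  | cons c ks ih =>
    intro r acc
    by_cases h : p ∈ d.getD c []
    · simp only [List.foldl_cons, if_pos h, pv_modify_insert]
      rw [ih r (acc ++ [c])]
      simp [h]
    · simp only [List.foldl_cons, if_neg h]
      rw [ih r acc]
      simp [h]

-- one cycle's contribution to the index: append c to q's entry iff q is a member
theorem pv_one_cycle (c : Int) (q : String) :
    ∀ (ns : List String) (idx : PySem.Dict String (List Int)), ns.Nodup →
    (ns.foldl (fun idx peptide => idx.modify peptide [] (· ++ [c])) idx).getD q []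
      = idx.getD q [] ++ (if q ∈ ns then [c] else []) := by
  intro ns
  induction ns with
  | nil => intro idx _; simp
  | cons x ns ih =>
    intro idx hnd
    simp only [List.foldl_cons]
    rw [ih _ hnd.of_cons]
    by_cases hx : q = x
    · subst hx
      have : q ∉ ns := (List.nodup_cons.mp hnd).1
      simp [this, PySem.Dict.getD_modify_self]
    · rw [PySem.Dict.getD_modify_of_ne]
      · simp [hx]
      · exact hx

-- the full index: q's entry lists, in order, the cycles whose member list contains q
theorem pv_index_getD (q : String) :
    ∀ (l : List (Int × List String)) (idx : PySem.Dict String (List Int)),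
    (l.foldl (fun idx cv =>
        (PySem.List.dedup cv.2).foldl (fun idx peptide => idx.modify peptide [] (· ++ [cv.1])) idx)
      idx).getD q []
      = idx.getD q [] ++ (l.filter (fun cv => decide (q ∈ cv.2))).map Prod.fst := by
  intro l
  induction l with
  | nil => intro idx; simp
  | cons cv l ih =>
    intro idx
    simp only [List.foldl_cons]
    rw [ih]
    have hndd : (PySem.List.dedup cv.2).Nodup := by
      rw [PySem.List.dedup_eq_ofList]; exact PySem.Set.nodup_ofList cv.2
    rw [pv_one_cycle cv.1 q (PySem.List.dedup cv.2) idx hndd]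
    have hm : (q ∈ PySem.List.dedup cv.2) ↔ q ∈ cv.2 := by
      rw [PySem.List.dedup_eq_ofList]; exact PySem.Set.mem_ofList cv.2 q
    by_cases h : q ∈ cv.2
    · simp [h]
    · simp [h]

-- scanning the (nodup) keys with a lookup equals filtering the items directly
theorem pv_keys_filter (q : String) :
    ∀ (l : List (Int × List String)), (l.map Prod.fst).Nodup →
    (l.map Prod.fst).filter (fun c => decide (q ∈ (PySem.Dict.mk l).getD c []))
      = (l.filter (fun cv => decide (q ∈ cv.2))).map Prod.fst := by
  intro l
  induction l with
  | nil => intro _; simp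
  | cons cv l ih =>
    intro hnd
    simp only [List.map_cons] at hnd
    have hhead : (PySem.Dict.mk (cv :: l)).getD cv.1 [] = cv.2 := by
      rw [PySem.Dict.getD_eq_get?_getD, PySem.Dict.get?_mk_cons]
      simp
    have htail : ∀ c ∈ l.map Prod.fst,
        (PySem.Dict.mk (cv :: l)).getD c [] = (PySem.Dict.mk l).getD c [] := by
      intro c hc
      have hne : cv.1 ≠ c := by
        intro he
        exact (List.nodup_cons.mp hnd).1 (he ▸ hc)
      rw [PySem.Dict.getD_eq_get?_getD, PySem.Dict.get?_mk_cons]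
      simp [hne, PySem.Dict.getD_eq_get?_getD]
    have hnd' : (l.map Prod.fst).Nodup := (List.nodup_cons.mp hnd).2
    simp only [List.map_cons, List.filter_cons, hhead]
    rw [List.filter_congr (fun c hc => by rw [htail c hc]), ih hnd']
    by_cases h : q ∈ cv.2 <;> simp [h]

-- ===== VERDICT (by name: the statement is the Claim_ definition above) =====
theorem peptides_appearances_by_cycle_spec : Claim_equal_peptides_appearances_by_cycle := by
  unfold Claim_equal_peptides_appearances_by_cycle
  intro base poc _
  unfold Spec_peptides_appearances_by_cycle
  unfold peptides_appearances_by_cycle peptides_appearances_by_cycle_alt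
  set d : PySem.Dict Int (List String) := PySem.Dict.ofList poc with hd
  have hnd : (d.items.map Prod.fst).Nodup := by
    have := PySem.Dict.nodup_keys_ofList (ps := poc) (κ := Int) (ν := List String)
    simpa [PySem.Dict.keys, hd] using this
  have hstep : ∀ (res : PySem.Dict String (List Int)) (p : String),
      d.keys.foldl (fun res cycle =>
          if p ∈ d.getD cycle [] then res.modify p [] (· ++ [cycle]) else res)
        (res.insert p [])
      = res.insert p ((d.items.foldl (fun idx cv =>
          (PySem.List.dedup cv.2).foldl (fun idx peptide => idx.modify peptide [] (· ++ [cv.1])) idx)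
        PySem.Dict.empty).getD p []) := by
    intro res p
    rw [pv_innerA d p d.keys res []]
    rw [pv_index_getD p d.items PySem.Dict.empty]
    have hkeys : d.keys = d.items.map Prod.fst := rfl
    have hmk : d = PySem.Dict.mk d.items := rfl
    rw [List.nil_append, PySem.Dict.getD_empty, List.nil_append]
    rw [hkeys]
    congr 1
    calc (d.items.map Prod.fst).filter (fun c => decide (p ∈ d.getD c []))
        = (d.items.map Prod.fst).filter (fun c => decide (p ∈ (PySem.Dict.mk d.items).getD c [])) := by rw [← hmk]
      _ = (d.items.filter (fun cv => decide (p ∈ cv.2))).map Prod.fst := pv_keys_filter p d.items hnd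
  dsimp only
  refine congrArg PySem.Dict.items ?_
  exact List.foldl_ext _ _ PySem.Dict.empty (fun res p _ => hstep res p)
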